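-- pv_equiv track=rewrite | github.com/Thopterek/ChessBenchmark | week02/Nate/fen_note.py | fen_to_description
-- ===== SOURCE A (Python) =====
-- def fen_to_description(fen):
--     """
--     Generate a natural language description of a chess position from FEN notation
--     """
--     # Define piece names and symbols
--     piece_names = {
--         'r': ('black rook', '♜'),
--         'n': ('black horse', '♞'),
--         'b': ('black bishop', '♝'),
--         'q': ('black queen', '♛'),
--         'k': ('black king', '♚'),
--         'p': ('black pawn', '♟'),
--         'R': ('white rook', '♖'),
--         'N': ('white horse', '♘'),
--         'B': ('white bishop', '♗'),
--         'Q': ('white queen', '♕'),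
--         'K': ('white king', '♔'),
--         'P': ('white pawn', '♙')
--     }
--
--     # File letters for coordinates
--     files = ['a', 'b', 'c', 'd', 'e', 'f', 'g', 'h']
--
--     # Split FEN and get board position
--     fen_parts = fen.split(' ')
--     board_fen = fen_parts[0]
--
--     # Parse the board
--     pieces_by_type = {}
--
--     rank = 8
--     for row in board_fen.split('/'):
--         file_index = 0
--         for char in row:
--             if char.isdigit():
--                 # Skip empty squares
--                 file_index += int(char)
--             else:
--                 # Found a piece
--                 piece_info = piece_names[char]
--                 piece_name = piece_info[0]
--                 square = f"{files[file_index]}{rank}"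
--
--                 if piece_name not in pieces_by_type:
--                     pieces_by_type[piece_name] = []
--                 pieces_by_type[piece_name].append(square)
--                 file_index += 1
--         rank -= 1
--
--     # Generate description
--     description_lines = []
--
--     # Process pieces in a specific order for better readability
--     piece_order = [
--         'black queen', 'black rook', 'black king', 'black bishop', 'black horse',
--         'white queen', 'white rook', 'white king', 'white bishop', 'white horse',
--         'black pawn', 'white pawn'
--     ]
--
--     for piece_type in piece_order:
--         if piece_type in pieces_by_type:
--             squares = pieces_by_type[piece_type]
--             if squares:
--                 color = 'black' if piece_type.startswith('black') else 'white'
--                 piece_name_simple = piece_type.replace('black ', '').replace('white ', '')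
--
--                 if len(squares) == 1:
--                     description_lines.append(f"{piece_type.capitalize()} is at {squares[0]}.")
--                 else:
--                     squares_str = ", ".join(squares[:-1]) + f" and {squares[-1]}"
--                     description_lines.append(f"{color.capitalize()} {piece_name_simple}s are at {squares_str}.")
--
--     return "\n".join(description_lines)
-- ===== SOURCE B (Python) =====
-- # B: flat-list parse (piece_name, square) in board order; per-type filter instead of dict grouping.
--
-- def _line(t, sqs):
--     if len(sqs) == 1:
--         return t.capitalize() + " is at " + sqs[0] + "."
--     color = 'black' if t.startswith('black') else 'white'
--     simple = t.replace('black ', '').replace('white ', '')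
--     return color.capitalize() + " " + simple + "s are at " + ", ".join(sqs[:-1]) + " and " + sqs[-1] + "."
--
-- def fen_to_description(fen):
--     files = 'abcdefgh'
--     names = {'r': 'black rook', 'n': 'black horse', 'b': 'black bishop', 'q': 'black queen',
--              'k': 'black king', 'p': 'black pawn', 'R': 'white rook', 'N': 'white horse',
--              'B': 'white bishop', 'Q': 'white queen', 'K': 'white king', 'P': 'white pawn'}
--     pieces = []
--     for i, row in enumerate(fen.split(' ')[0].split('/')):
--         fi = 0
--         for ch in row:
--             if ch.isdigit():
--                 fi += int(ch)
--             else: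
--                 pieces.append((names[ch], files[fi] + str(8 - i)))
--                 fi += 1
--     order = ['black queen', 'black rook', 'black king', 'black bishop', 'black horse',
--              'white queen', 'white rook', 'white king', 'white bishop', 'white horse',
--              'black pawn', 'white pawn']
--     lines = []
--     for t in order:
--         sqs = [sq for name, sq in pieces if name == t]
--         if sqs:
--             lines.append(_line(t, sqs))
--     return "\n".join(lines)
-- ===== Notes on version B (the rewrite author's own statement) =====
-- stated objective: alternative
-- what changed: Replaced A's dict-grouping keyed by piece name (built during parsing, then looked up per piece type) with a flat (name, square) list appended in board order and a per-type filter scan in the output loop; rank comes from enumerate instead of a decrementing counter.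
import Mathlib
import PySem

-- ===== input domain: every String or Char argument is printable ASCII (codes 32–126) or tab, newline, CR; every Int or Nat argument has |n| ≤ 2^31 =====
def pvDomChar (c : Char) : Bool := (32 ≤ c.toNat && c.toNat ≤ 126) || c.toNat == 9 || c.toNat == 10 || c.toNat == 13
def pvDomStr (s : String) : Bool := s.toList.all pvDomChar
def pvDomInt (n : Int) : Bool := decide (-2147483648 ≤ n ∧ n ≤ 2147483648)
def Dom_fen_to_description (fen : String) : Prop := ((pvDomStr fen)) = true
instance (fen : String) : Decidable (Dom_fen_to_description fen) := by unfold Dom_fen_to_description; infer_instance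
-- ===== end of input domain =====

-- B replaces A's dict-grouping (keyed by piece name, looked up per type) by a flat (name, square)
-- list built in board order that the output loop filters per piece type; same output (objective: alternative).

-- ===== PORT A =====
-- hand port of str.capitalize (no PySem primitive): exact on ASCII — upper-case first char, lower-case the rest
def pyCapitalize (s : String) : String :=
  match s.toList with
  | [] => s
  | c :: cs => String.ofList (PySem.Chars.upperChar c :: PySem.Chars.lower cs)

def fenFilesA : List String := ["a", "b", "c", "d", "e", "f", "g", "h"]

def fenPieceNamesA : PySem.Dict Char (String × String) :=
  PySem.Dict.ofList
    [('r', ("black rook", "♜")), ('n', ("black horse", "♞")), ('b', ("black bishop", "♝")),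
     ('q', ("black queen", "♛")), ('k', ("black king", "♚")), ('p', ("black pawn", "♟")),
     ('R', ("white rook", "♖")), ('N', ("white horse", "♘")), ('B', ("white bishop", "♗")),
     ('Q', ("white queen", "♕")), ('K', ("white king", "♔")), ('P', ("white pawn", "♙"))]

def fenPieceOrderA : List String :=
  ["black queen", "black rook", "black king", "black bishop", "black horse",
   "white queen", "white rook", "white king", "white bishop", "white horse",
   "black pawn", "white pawn"]

-- inner loop over a row's characters; state = (file_index, pieces_by_type); none = exception raised
def fenCharA (rank : Int) (st : Option (Int × PySem.Dict String (List String))) (ch : Char) :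
    Option (Int × PySem.Dict String (List String)) :=
  match st with
  | none => none
  | some (fi, d) =>
    if PySem.Chars.isdigit ch then
      some (fi + (PySem.Int.ofChars? [ch]).getD 0, d)
    else
      match fenPieceNamesA.get? ch with        -- piece_names[char]; none = KeyError
      | none => none
      | some pieceInfo =>
        match PySem.List.pyGet? fenFilesA fi with   -- files[file_index]; none = IndexError
        | none => none
        | some f =>
          let square := f ++ PySem.Int.toStr rank
          let d := if d.contains pieceInfo.1 then d else d.insert pieceInfo.1 []
          some (fi + 1, d.modify pieceInfo.1 [] (fun l => l ++ [square]))

-- outer loop over rows; state = (rank, pieces_by_type)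
def fenRowA (st : Option (Int × PySem.Dict String (List String))) (row : String) :
    Option (Int × PySem.Dict String (List String)) :=
  match st with
  | none => none
  | some (rank, d) =>
    match row.toList.foldl (fenCharA rank) (some ((0 : Int), d)) with
    | none => none
    | some (_, d') => some (rank - 1, d')

def fen_to_description (fen : String) : String :=
  let fen_parts := (PySem.Str.split? fen " ").getD []   -- sep ≠ "", so split? is always some
  let board_fen := fen_parts.headD ""                   -- fen_parts[0]; split is never empty
  match (PySem.Str.split? board_fen "/").getD [] |>.foldl fenRowA (some ((8 : Int), PySem.Dict.empty)) with
  | none => ""                                          -- unreachable under Pre_: Python raises here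
  | some (_, pieces_by_type) =>
    let description_lines := fenPieceOrderA.foldl (fun acc piece_type =>
      if pieces_by_type.contains piece_type then
        let squares := pieces_by_type.getD piece_type []   -- dict[piece_type]; exact: guarded by contains
        if squares ≠ [] then
          let color := if PySem.Str.startswith piece_type "black" then "black" else "white"
          let simple := PySem.Str.replace (PySem.Str.replace piece_type "black " "") "white " ""
          if squares.length == 1 then
            acc ++ [pyCapitalize piece_type ++ " is at " ++ PySem.List.pyGetD squares 0 "" ++ "."]
          else
            acc ++ [pyCapitalize color ++ " " ++ simple ++ "s are at " ++
              PySem.Str.join ", " (PySem.List.slice squares none (some (-1))) ++ " and " ++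
              PySem.List.pyGetD squares (-1) "" ++ "."]
        else acc
      else acc) []
    PySem.Str.join "\n" description_lines

-- ===== PORT B =====
def fenNamesB : PySem.Dict Char String :=
  PySem.Dict.ofList
    [('r', "black rook"), ('n', "black horse"), ('b', "black bishop"), ('q', "black queen"),
     ('k', "black king"), ('p', "black pawn"), ('R', "white rook"), ('N', "white horse"),
     ('B', "white bishop"), ('Q', "white queen"), ('K', "white king"), ('P', "white pawn")]

def fenPieceOrderB : List String :=
  ["black queen", "black rook", "black king", "black bishop", "black horse",
   "white queen", "white rook", "white king", "white bishop", "white horse",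
   "black pawn", "white pawn"]

def fenLineB (t : String) (sqs : List String) : String :=
  if sqs.length == 1 then
    pyCapitalize t ++ " is at " ++ PySem.List.pyGetD sqs 0 "" ++ "."
  else
    let color := if PySem.Str.startswith t "black" then "black" else "white"
    let simple := PySem.Str.replace (PySem.Str.replace t "black " "") "white " ""
    pyCapitalize color ++ " " ++ simple ++ "s are at " ++
      PySem.Str.join ", " (PySem.List.slice sqs none (some (-1))) ++ " and " ++
      PySem.List.pyGetD sqs (-1) "" ++ "."

-- inner loop: state = (file_index, flat pieces list); none = exception raised
def fenCharB (i : Int) (st : Option (Int × List (String × String))) (ch : Char) :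
    Option (Int × List (String × String)) :=
  match st with
  | none => none
  | some (fi, ps) =>
    if PySem.Chars.isdigit ch then
      some (fi + (PySem.Int.ofChars? [ch]).getD 0, ps)
    else
      match fenNamesB.get? ch with             -- names[ch]; none = KeyError
      | none => none
      | some name =>
        match PySem.Str.pyGet? "abcdefgh" fi with   -- files[fi]; none = IndexError
        | none => none
        | some f => some (fi + 1, ps ++ [(name, String.ofList [f] ++ PySem.Int.toStr (8 - i))])

-- outer loop over enumerate(rows)
def fenRowB (st : Option (List (String × String))) (p : Int × String) :
    Option (List (String × String)) :=
  match st with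
  | none => none
  | some ps =>
    match p.2.toList.foldl (fenCharB p.1) (some ((0 : Int), ps)) with
    | none => none
    | some (_, ps') => some ps'

def fen_to_description_alt (fen : String) : String :=
  let rows := (PySem.Str.split? (((PySem.Str.split? fen " ").getD []).headD "") "/").getD []
  match (PySem.List.enumerate rows).foldl fenRowB (some []) with
  | none => ""                                 -- unreachable under Pre_
  | some pieces =>
    let lines := fenPieceOrderB.foldl (fun acc t =>
      let sqs := (pieces.filter (fun p => p.1 == t)).map (·.2)
      if sqs ≠ [] then acc ++ [fenLineB t sqs] else acc) []
    PySem.Str.join "\n" lines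

-- ===== PRECONDITION & SPEC =====
-- Pre_ excludes exactly the inputs on which Python A raises: a board char that is neither a digit
-- nor a piece letter (KeyError in piece_names[char]), or a piece char whose running file index
-- exceeds 7 (IndexError in files[file_index]).
def Pre_fen_to_description (fen : String) : Prop :=
  ∀ row ∈ (PySem.Str.split? (((PySem.Str.split? fen " ").getD []).headD "") "/").getD [],
    ∀ i < row.toList.length,
      (PySem.Chars.isdigit (row.toList.getD i ' ') = true ∨
       ((row.toList.getD i ' ') ∈ ['r','n','b','q','k','p','R','N','B','Q','K','P'] ∧
        ((row.toList.take i).map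
          (fun c => if PySem.Chars.isdigit c then ((c.toNat : Int) - 48) else 1)).sum ≤ 7))
instance (fen : String) : Decidable (Pre_fen_to_description fen) := by
  unfold Pre_fen_to_description; infer_instance

def pvWitness_fen_to_description : String := "rnbqkbnr/pppppppp/8/8/8/8/PPPPPPPP/RNBQKBNR w KQkq - 0 1"

def Spec_fen_to_description (fen : String) (out : String) : Prop := out = fen_to_description_alt fen
instance (fen : String) (out : String) : Decidable (Spec_fen_to_description fen out) := by
  unfold Spec_fen_to_description; infer_instance

-- ===== CLAIM (what is proved, stated in full; the proofs are below) =====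
def Claim_equal_fen_to_description : Prop :=
  ∀ (fen : String), Dom_fen_to_description fen → Pre_fen_to_description fen →
    Spec_fen_to_description fen (fen_to_description fen)

-- ===== LEMMAS AND PROOFS =====

-- the grouping step: B's flat list folded into A's dict
def fenStep (d : PySem.Dict String (List String)) (p : String × String) :
    PySem.Dict String (List String) :=
  (if d.contains p.1 then d else d.insert p.1 []).modify p.1 [] (fun l => l ++ [p.2])

def fenGrp (ps : List (String × String)) : PySem.Dict String (List String) :=
  ps.foldl fenStep PySem.Dict.empty

def fenSel (ps : List (String × String)) (t : String) : List String :=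
  (ps.filter (fun p => p.1 == t)).map (·.2)

lemma fenStep_getD (d : PySem.Dict String (List String)) (p : String × String) (t : String) :
    (fenStep d p).getD t [] = d.getD t [] ++ (if p.1 = t then [p.2] else []) := by
  unfold fenStep
  by_cases h : p.1 = t
  · subst h
    rw [PySem.Dict.getD_modify_self]
    by_cases hc : d.contains p.1
    · simp [hc]
    · simp only [Bool.not_eq_true] at hc
      simp [hc, PySem.Dict.getD_insert_self, PySem.Dict.getD_of_not_contains d _ hc]
  · rw [PySem.Dict.getD_modify_of_ne _ _ _ (Ne.symm h)]
    by_cases hc : d.contains p.1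
    · simp [hc, h]
    · simp [hc, h, PySem.Dict.getD_insert_of_ne _ _ _ (Ne.symm h)]

lemma fenStep_contains (d : PySem.Dict String (List String)) (p : String × String) (t : String) :
    (fenStep d p).contains t = (t == p.1 || d.contains t) := by
  unfold fenStep
  by_cases hc : d.contains p.1
  · simp [hc, PySem.Dict.contains_modify]
  · simp [hc, PySem.Dict.contains_modify, PySem.Dict.contains_insert]

lemma fenGrp_getD_aux (ps : List (String × String)) (d : PySem.Dict String (List String))
    (t : String) : (ps.foldl fenStep d).getD t [] = d.getD t [] ++ fenSel ps t := by
  induction ps generalizing d with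
  | nil => simp [fenSel]
  | cons p ps ih =>
    rw [List.foldl_cons, ih, fenStep_getD]
    by_cases h : p.1 = t <;> simp [fenSel, h]

lemma fenGrp_contains_aux (ps : List (String × String)) (d : PySem.Dict String (List String))
    (t : String) : (ps.foldl fenStep d).contains t = (d.contains t || decide (t ∈ ps.map (·.1))) := by
  induction ps generalizing d with
  | nil => simp
  | cons p ps ih =>
    rw [List.foldl_cons, ih, fenStep_contains]
    by_cases h : t = p.1
    · subst h; simp
    · have hb : (t == p.1) = false := by simpa using h
      by_cases hm : t ∈ List.map (fun x => x.1) ps <;>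
        simp [hm, h, hb, List.mem_cons, List.map_cons]

lemma fenSel_eq_nil_iff (ps : List (String × String)) (t : String) :
    fenSel ps t = [] ↔ t ∉ ps.map (·.1) := by
  unfold fenSel
  rw [List.map_eq_nil_iff, List.filter_eq_nil_iff]
  constructor
  · intro h hm
    obtain ⟨p, hp, hfst⟩ := List.mem_map.1 hm
    exact absurd (by simpa using hfst : p.1 == t) (by simpa using h p hp)
  · intro h p hp hb
    exact h (List.mem_map.2 ⟨p, hp, by simpa using hb⟩)

lemma fenGrp_getD (ps : List (String × String)) (t : String) :
    (fenGrp ps).getD t [] = fenSel ps t := by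
  unfold fenGrp; rw [fenGrp_getD_aux]; simp

lemma fenGrp_contains (ps : List (String × String)) (t : String) :
    (fenGrp ps).contains t = decide (t ∈ ps.map (·.1)) := by
  unfold fenGrp; rw [fenGrp_contains_aux]; simp

-- piece_names lookups of the two ports agree on the name component
lemma fenNames_rel (c : Char) : (fenPieceNamesA.get? c).map Prod.fst = fenNamesB.get? c := by
  by_cases h : c ∈ ['r','n','b','q','k','p','R','N','B','Q','K','P']
  · fin_cases h <;> decide
  · have hA : fenPieceNamesA.get? c = none := by
      rw [PySem.Dict.get?_eq_none_iff_not_mem_keys]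
      have hk : fenPieceNamesA.keys = ['r','n','b','q','k','p','R','N','B','Q','K','P'] := by decide
      rw [hk]; exact h
    have hB : fenNamesB.get? c = none := by
      rw [PySem.Dict.get?_eq_none_iff_not_mem_keys]
      have hk : fenNamesB.keys = ['r','n','b','q','k','p','R','N','B','Q','K','P'] := by decide
      rw [hk]; exact h
    rw [hA, hB]; rfl

-- files lookups agree
lemma fenFiles_rel (fi : Int) :
    PySem.List.pyGet? fenFilesA fi =
      (PySem.List.pyGet? "abcdefgh".toList fi).map (fun c => String.ofList [c]) := by
  have h : fenFilesA = ("abcdefgh".toList).map (fun c => String.ofList [c]) := by decide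
  rw [h]
  unfold PySem.List.pyGet?
  rw [List.length_map]
  cases PySem.List.pyIdx? "abcdefgh".toList.length fi with
  | none => rfl
  | some k => rcases k with _|_|_|_|_|_|_|_|n <;> rfl

-- a raised exception is absorbing in every loop
lemma fenCharA_none (rank : Int) (cs : List Char) :
    cs.foldl (fenCharA rank) none = none := by
  induction cs with
  | nil => rfl
  | cons c cs ih => simpa [fenCharA] using ih

lemma fenCharB_none (i : Int) (cs : List Char) :
    cs.foldl (fenCharB i) none = none := by
  induction cs with
  | nil => rfl
  | cons c cs ih => simpa [fenCharB] using ih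

lemma fenRowA_none (rows : List String) : rows.foldl fenRowA none = none := by
  induction rows with
  | nil => rfl
  | cons r rs ih => simpa [fenRowA] using ih

lemma fenRowB_none (rows : List (Int × String)) : rows.foldl fenRowB none = none := by
  induction rows with
  | nil => rfl
  | cons r rs ih => simpa [fenRowB] using ih

lemma fenGrp_append (ps : List (String × String)) (e : String × String) :
    fenGrp (ps ++ [e]) = fenStep (fenGrp ps) e := by
  unfold fenGrp; rw [List.foldl_append]; rfl

-- the inner char loops simulate each other
lemma fenChar_rel (rank i : Int) (h : rank = 8 - i) (cs : List Char) :
    ∀ (fi : Int) (ps : List (String × String)),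
      cs.foldl (fenCharA rank) (some (fi, fenGrp ps)) =
        (cs.foldl (fenCharB i) (some (fi, ps))).map (fun q => (q.1, fenGrp q.2)) := by
  induction cs with
  | nil => intro fi ps; rfl
  | cons c cs ih =>
    intro fi ps
    rw [List.foldl_cons, List.foldl_cons]
    by_cases hd : PySem.Chars.isdigit c
    · simp only [fenCharA, fenCharB, hd, if_pos]
      exact ih _ ps
    · simp only [fenCharA, fenCharB, hd, if_neg, Bool.false_eq_true, not_false_iff]
      cases hA : fenPieceNamesA.get? c with
      | none =>
        have hB : fenNamesB.get? c = none := by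
          rw [← fenNames_rel, hA]; rfl
        rw [hB]
        simp [fenCharA_none, fenCharB_none]
      | some pi =>
        have hB : fenNamesB.get? c = some pi.1 := by
          rw [← fenNames_rel, hA]; rfl
        rw [hB]
        cases hF : PySem.List.pyGet? fenFilesA fi with
        | none =>
          have hF' : PySem.List.pyGet? "abcdefgh".toList fi = none := by
            have h2 := (fenFiles_rel fi).symm.trans hF
            simpa using h2
          simp only [PySem.Str.pyGet?_eq, PySem.Chars.pyGet?_eq_listPyGet?]
          rw [hF']
          simp [fenCharA_none, fenCharB_none]
        | some f =>
          have h2 := (fenFiles_rel fi).symm.trans hF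
          simp only [Option.map_eq_some_iff] at h2
          obtain ⟨ch, hx, hchf⟩ := h2
          · simp only [PySem.Str.pyGet?_eq, PySem.Chars.pyGet?_eq_listPyGet?]
            rw [hx]
            have this : String.ofList [ch] = f := hchf
            have hsq : f ++ PySem.Int.toStr rank = String.ofList [ch] ++ PySem.Int.toStr (8 - i) := by
              rw [← this, h]
            rw [hsq]
            have hstep : fenStep (fenGrp ps) (pi.1, String.ofList [ch] ++ PySem.Int.toStr (8 - i)) =
                fenGrp (ps ++ [(pi.1, String.ofList [ch] ++ PySem.Int.toStr (8 - i))]) :=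
              (fenGrp_append _ _).symm
            simp only [fenStep] at hstep
            rw [hstep]
            exact ih _ _

-- the row loops simulate each other
lemma fenRow_rel (rows : List String) :
    ∀ (k : Nat) (ps : List (String × String)),
      rows.foldl fenRowA (some (8 - (k : Int), fenGrp ps)) =
        ((PySem.List.enumerate rows (k : Int)).foldl fenRowB (some ps)).map
          (fun q => (8 - (k : Int) - rows.length, fenGrp q)) := by
  induction rows with
  | nil => intro k ps; simp [PySem.List.enumerate]
  | cons row rest ih =>
    intro k ps
    have henum : PySem.List.enumerate (row :: rest) (k : Int) =
        ((k : Int), row) :: PySem.List.enumerate rest ((k : Int) + 1) := rfl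
    rw [henum, List.foldl_cons, List.foldl_cons]
    have hrowA : fenRowA (some (8 - (k : Int), fenGrp ps)) row =
        match row.toList.foldl (fenCharA (8 - (k : Int))) (some ((0 : Int), fenGrp ps)) with
        | none => none
        | some (_, d') => some (8 - (k : Int) - 1, d') := rfl
    have hchar := fenChar_rel (8 - (k : Int)) (k : Int) rfl row.toList 0 ps
    cases hB : row.toList.foldl (fenCharB (k : Int)) (some ((0 : Int), ps)) with
    | none =>
      rw [hB] at hchar
      simp only [Option.map_none] at hchar
      rw [hrowA, hchar]
      have hfB : fenRowB (some ps) ((k : Int), row) = none := by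
        simp only [fenRowB, hB]
      rw [hfB, fenRowA_none, fenRowB_none]
      rfl
    | some q =>
      rw [hB] at hchar
      simp only [Option.map_some] at hchar
      rw [hrowA, hchar]
      have hfB : fenRowB (some ps) ((k : Int), row) = some q.2 := by
        simp only [fenRowB, hB]
      rw [hfB]
      have hcast : (8 : Int) - ((k + 1 : Nat) : Int) = 8 - (k : Int) - 1 := by push_cast; ring
      have := ih (k + 1) q.2
      rw [hcast] at this
      have henum2 : PySem.List.enumerate rest ((k : Int) + 1) =
          PySem.List.enumerate rest (((k + 1 : Nat) : Int)) := by push_cast; rfl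
      rw [henum2, this]
      apply congrFun
      apply congrArg
      funext p
      have hlen : (8 : Int) - (k : Int) - ((row :: rest).length : Int) =
          8 - (k : Int) - 1 - (rest.length : Int) := by
        push_cast [List.length_cons]; ring
      rw [hlen]

-- the output lines agree once the square lists agree
lemma fenLine_rel (t : String) (squares : List String) :
    (if squares.length == 1 then
        pyCapitalize t ++ " is at " ++ PySem.List.pyGetD squares 0 "" ++ "."
      else
        (if PySem.Str.startswith t "black" then "black" else "white") |> fun color =>
        PySem.Str.replace (PySem.Str.replace t "black " "") "white " "" |> fun simple =>
        pyCapitalize color ++ " " ++ simple ++ "s are at " ++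
          PySem.Str.join ", " (PySem.List.slice squares none (some (-1))) ++ " and " ++
          PySem.List.pyGetD squares (-1) "" ++ ".") = fenLineB t squares := by
  unfold fenLineB
  split <;> rfl

-- ===== VERDICT (by name: the statement is the Claim_ definition above) =====
theorem fen_to_description_spec : Claim_equal_fen_to_description := by
  unfold Claim_equal_fen_to_description
  intro fen _ _
  unfold Spec_fen_to_description
  simp only [fen_to_description, fen_to_description_alt]
  have h0 : (8 : Int) = 8 - ((0 : Nat) : Int) := by norm_num
  have hgrp0 : (PySem.Dict.empty : PySem.Dict String (List String)) = fenGrp [] := rfl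
  rw [h0, hgrp0, fenRow_rel _ 0 []]
  have hen : PySem.List.enumerate
      ((PySem.Str.split? (((PySem.Str.split? fen " ").getD []).headD "") "/").getD []) ((0 : Nat) : Int) =
      PySem.List.enumerate
      ((PySem.Str.split? (((PySem.Str.split? fen " ").getD []).headD "") "/").getD []) := rfl
  rw [hen]
  cases hB : (PySem.List.enumerate
      ((PySem.Str.split? (((PySem.Str.split? fen " ").getD []).headD "") "/").getD [])).foldl fenRowB (some []) with
  | none => rfl
  | some ps =>
    simp only [Option.map_some]
    have horder : fenPieceOrderA = fenPieceOrderB := rfl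
    rw [horder]
    apply congrArg
    apply PySem.List.foldl_congr_mem
    intro acc t _
    by_cases hm : t ∈ ps.map (·.1)
    · have hc : (fenGrp ps).contains t = true := by rw [fenGrp_contains]; simpa using hm
      have hgd : (fenGrp ps).getD t [] = fenSel ps t := fenGrp_getD ps t
      have hne : fenSel ps t ≠ [] := by
        intro hnil; exact ((fenSel_eq_nil_iff ps t).1 hnil) hm
      simp only [hc, if_pos, hgd]
      have hsel : (ps.filter (fun p => p.1 == t)).map (·.2) = fenSel ps t := rfl
      rw [hsel]
      simp only [hne, if_pos, ne_eq, not_false_iff]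
      have := fenLine_rel t (fenSel ps t)
      simp only at this
      rw [← this]
      split <;> rfl
    · have hc : (fenGrp ps).contains t = false := by
        rw [fenGrp_contains]; simpa using hm
      have hnil : (ps.filter (fun p => p.1 == t)).map (·.2) = [] :=
        (fenSel_eq_nil_iff ps t).2 hm
      simp [hc, hnil]
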